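-- pv_equiv track=rewrite | github.com/JanLopata/AoC_2019_python | day13.py | find_symmetries
-- ===== SOURCE A (Python) =====
-- def check_symmetry(data, start):
--     idx = 0
--     first = start - idx - 1
--     second = start + idx
--     while second < len(data) and first >= 0:
--         if data[first] != data[second]:
--             return False
--         idx += 1
--         first = start - idx - 1
--         second = start + idx
--
--     return True
--
-- def find_symmetries(data):
--     symmetries_found = []
--     prev = -1
--     for i in range(len(data)):
--         if data[i] == prev:
--             if check_symmetry(data, i):
--                 symmetries_found.append(i)
--         prev = data[i]
--
--     return symmetries_found
-- ===== SOURCE B (Python) =====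
-- def find_symmetries(data):
--     n = len(data)
--     return [i for i in range(1, n)
--             if data[i - 1] == data[i]
--             and data[max(0, 2 * i - n):i] == data[i:2 * i][::-1]]
-- ===== Notes on version B (the rewrite author's own statement) =====
-- stated objective: idiomatic
-- what changed: Replaces the stateful prev-tracking loop plus an index-by-index expanding while-loop helper with a single list comprehension that tests each center by one slice comparison (mirrored prefix == reversed suffix), and drops A's '-1' sentinel for prev.
-- intended difference: On inputs whose first element is -1, A's sentinel prev=-1 makes it additionally report index 0 (a zero-width symmetry at the left edge) as the first element of its result, while B returns only the real centers between 1 and n-1; a zero-width reflection is not a symmetry, so B's value is the intended one. — e.g. on find_symmetries([-1]): A returns [0], B returns []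
import Mathlib
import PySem

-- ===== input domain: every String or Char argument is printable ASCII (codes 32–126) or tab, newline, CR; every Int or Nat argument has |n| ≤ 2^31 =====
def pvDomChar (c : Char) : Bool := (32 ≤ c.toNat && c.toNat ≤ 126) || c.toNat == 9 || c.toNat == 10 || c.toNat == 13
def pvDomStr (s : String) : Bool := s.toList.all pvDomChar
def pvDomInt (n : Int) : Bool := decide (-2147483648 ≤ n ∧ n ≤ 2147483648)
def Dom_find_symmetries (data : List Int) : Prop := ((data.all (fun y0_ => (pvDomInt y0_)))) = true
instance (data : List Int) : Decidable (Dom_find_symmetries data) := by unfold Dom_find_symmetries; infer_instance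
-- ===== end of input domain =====

-- B replaces A's stateful prev-tracking loop + expanding while-loop helper by one slice-comparison
-- comprehension over centers 1..n-1 (idiomatic); A's prev = -1 sentinel additionally makes A report
-- center 0 when the first element is -1, which B intentionally does not (see D_ below).

-- ===== PORT A =====
-- while loop of check_symmetry: 'first'/'second' inlined as start-idx-1 / start+idx; the Nat fuel
-- only makes the recursion structural — fuel = len(data)+1 at the call site always outlasts the
-- loop, whose guard forces start+idx to stay below len(data).
def check_symmetry_loop (data : List Int) (start idx : Int) : Nat → Bool
  | 0 => true
  | fuel+1 =>
    if start + idx < (data.length : Int) ∧ 0 ≤ start - idx - 1 then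
      if PySem.List.pyGetD data (start - idx - 1) 0 ≠ PySem.List.pyGetD data (start + idx) 0 then
        false
      else check_symmetry_loop data start (idx + 1) fuel
    else true

def find_symmetries (data : List Int) : List Int :=
  ((PySem.List.pyRange 0 (data.length : Int)).foldl
    (fun (st : Int × List Int) i =>
      (PySem.List.pyGetD data i 0,
       if PySem.List.pyGetD data i 0 = st.1 then
         (if check_symmetry_loop data i 0 (data.length + 1) then st.2 ++ [i] else st.2)
       else st.2))
    ((-1 : Int), ([] : List Int))).2

-- ===== PORT B =====
def find_symmetries_alt (data : List Int) : List Int :=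
  let n : Int := (data.length : Int)
  (PySem.List.pyRange 1 n).filter (fun i =>
    (PySem.List.pyGetD data (i - 1) 0 == PySem.List.pyGetD data i 0) &&
    (PySem.List.slice data (some (max 0 (2 * i - n))) (some i) ==
      (PySem.List.slice data (some i) (some (2 * i))).reverse))

-- ===== PRECONDITION & SPEC =====
-- On inputs whose first element is -1, A's sentinel prev = -1 makes it additionally report index 0
-- (a zero-width "symmetry") as the first element of its result, while B returns only the real
-- centers 1..n-1; a zero-width reflection at the edge is not a symmetry, so B's is the intended value.
def D_find_symmetries (data : List Int) : Prop := data.head? = some (-1)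
instance (data : List Int) : Decidable (D_find_symmetries data) := by
  unfold D_find_symmetries; infer_instance

def Spec_find_symmetries (data : List Int) (out : List Int) : Prop :=
  ¬ D_find_symmetries data → out = find_symmetries_alt data
instance (data : List Int) (out : List Int) : Decidable (Spec_find_symmetries data out) := by
  unfold Spec_find_symmetries; infer_instance

def pvDiffWitness_find_symmetries : List Int := [-1]
def pvDiffWitnessOut_find_symmetries : (List Int) × (List Int) := ([0], [])

-- ===== CLAIM (what is proved, stated in full; the proofs are below) =====
def Claim_unchanged_find_symmetries : Prop :=
  ∀ (data : List Int), Dom_find_symmetries data → Spec_find_symmetries data (find_symmetries data)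
def Claim_changed_find_symmetries : Prop :=
  Dom_find_symmetries (pvDiffWitness_find_symmetries) ∧
  D_find_symmetries (pvDiffWitness_find_symmetries) ∧
  find_symmetries (pvDiffWitness_find_symmetries) = pvDiffWitnessOut_find_symmetries.1 ∧
  find_symmetries_alt (pvDiffWitness_find_symmetries) = pvDiffWitnessOut_find_symmetries.2 ∧
  pvDiffWitnessOut_find_symmetries.1 ≠ pvDiffWitnessOut_find_symmetries.2
def Claim_exact_find_symmetries : Prop :=
  ∀ (data : List Int), Dom_find_symmetries data → D_find_symmetries data →
    find_symmetries data ≠ find_symmetries_alt data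

-- ===== LEMMAS AND PROOFS =====

-- A's loop body and B's filter predicate, named for the proofs (definitionally the port bodies).
def stepA (data : List Int) (st : Int × List Int) (i : Int) : Int × List Int :=
  (PySem.List.pyGetD data i 0,
   if PySem.List.pyGetD data i 0 = st.1 then
     (if check_symmetry_loop data i 0 (data.length + 1) then st.2 ++ [i] else st.2)
   else st.2)

def condB (data : List Int) (i : Int) : Bool :=
  (PySem.List.pyGetD data (i - 1) 0 == PySem.List.pyGetD data i 0) &&
  (PySem.List.slice data (some (max 0 (2 * i - (data.length : Int)))) (some i) ==
    (PySem.List.slice data (some i) (some (2 * i))).reverse)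

lemma find_symmetries_eq (data : List Int) :
    find_symmetries data =
      ((PySem.List.pyRange 0 (data.length : Int)).foldl (stepA data) ((-1 : Int), [])).2 := rfl

lemma find_symmetries_alt_eq (data : List Int) :
    find_symmetries_alt data =
      (PySem.List.pyRange 1 (data.length : Int)).filter (condB data) := rfl

-- common specification of "the reflection at center i is palindromic to the nearer edge"
def palP (data : List Int) (i : Nat) : Prop :=
  ∀ k : Nat, i + k < data.length → k < i →
    data.getD (i - 1 - k) 0 = data.getD (i + k) 0

lemma loop_char (data : List Int) (i : Nat) :
    ∀ (fuel idx : Nat), data.length ≤ i + idx + fuel →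
      (check_symmetry_loop data (i : Int) (idx : Int) fuel = true ↔
        ∀ k : Nat, idx ≤ k → i + k < data.length → k < i →
          data.getD (i - 1 - k) 0 = data.getD (i + k) 0) := by
  intro fuel
  induction fuel with
  | zero =>
    intro idx hle
    simp only [check_symmetry_loop]
    refine iff_of_true (by trivial) ?_
    intro k hk h1 h2
    exact absurd h1 (by omega)
  | succ fuel ih =>
    intro idx hle
    rw [check_symmetry_loop]
    by_cases hg : (i : Int) + (idx : Int) < (data.length : Int) ∧ 0 ≤ (i : Int) - (idx : Int) - 1
    · rw [if_pos hg]
      obtain ⟨hga, hgb⟩ := hg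
      have e1 : (i : Int) - (idx : Int) - 1 = ((i - 1 - idx : Nat) : Int) := by omega
      have e2 : (i : Int) + (idx : Int) = ((i + idx : Nat) : Int) := by omega
      rw [e1, e2, PySem.List.pyGetD_natCast, PySem.List.pyGetD_natCast]
      by_cases hv : data.getD (i - 1 - idx) 0 = data.getD (i + idx) 0
      · rw [if_neg (not_not_intro hv)]
        have e3 : ((idx : Int) + 1) = ((idx + 1 : Nat) : Int) := by omega
        rw [e3, ih (idx + 1) (by omega)]
        constructor
        · intro h k hk h1 h2
          rcases Nat.eq_or_lt_of_le hk with rfl | hlt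
          · exact hv
          · exact h k hlt h1 h2
        · intro h k hk h1 h2
          exact h k (by omega) h1 h2
      · rw [if_pos hv]
        simp only [Bool.false_eq_true, false_iff]
        intro hall
        exact hv (hall idx le_rfl (by omega) (by omega))
    · rw [if_neg hg]
      refine iff_of_true (by trivial) ?_
      intro k hk h1 h2
      exfalso
      rcases not_and_or.mp hg with h | h <;> omega

lemma checkA (data : List Int) (i : Nat) :
    (check_symmetry_loop data (i : Int) 0 (data.length + 1) = true) ↔ palP data i := by
  have h := loop_char data i (data.length + 1) 0 (by omega)
  simpa [palP] using h

lemma slice_char (data : List Int) (i : Nat) (h1 : 1 ≤ i) (h2 : i < data.length) :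
    (PySem.List.slice data (some (max 0 (2 * (i : Int) - (data.length : Int)))) (some (i : Int)) =
      (PySem.List.slice data (some (i : Int)) (some (2 * (i : Int)))).reverse) ↔ palP data i := by
  have ha : max 0 (2 * (i : Int) - (data.length : Int)) = ((2 * i - data.length : Nat) : Int) := by
    omega
  have hb : (2 * (i : Int)) = ((2 * i : Nat) : Int) := by push_cast; ring
  rw [ha, hb, PySem.List.slice_natCast, PySem.List.slice_natCast]
  set m := min i (data.length - i) with hm
  have e1 : i - (2 * i - data.length) = m := by omega
  have e2 : 2 * i - i = i := by omega
  rw [e1, e2]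
  have e3 : 2 * i - data.length = i - m := by omega
  rw [e3]
  have hR : (data.drop i).take i = (data.drop i).take m := by
    rcases Nat.le_total i (data.length - i) with h | h
    · rw [show m = i by omega]
    · have hlen : (data.drop i).length = data.length - i := by simp
      rw [List.take_of_length_le (by omega), show m = data.length - i by omega,
        List.take_of_length_le (by omega)]
  rw [hR]
  have hLlen : ((data.drop (i - m)).take m).length = m := by simp; omega
  have hRlen : ((data.drop i).take m).length = m := by simp; omega
  constructor
  · intro heq k hk1 hk2
    have hkm : k < m := by omega
    have h3 := congrArg (fun l => l[(m - 1 - k)]?.getD 0) heq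
    dsimp only at h3
    rw [List.getElem?_reverse (by rw [hRlen]; omega), hRlen,
      show m - 1 - (m - 1 - k) = k by omega] at h3
    rw [List.getElem?_take, if_pos (by omega), List.getElem?_drop] at h3
    rw [List.getElem?_take, if_pos hkm, List.getElem?_drop] at h3
    rw [show i - m + (m - 1 - k) = i - 1 - k by omega] at h3
    rw [List.getD_eq_getElem?_getD, List.getD_eq_getElem?_getD]
    exact h3
  · intro hpal
    apply List.ext_getElem (by rw [List.length_reverse, hLlen, hRlen])
    intro j hjl hjr
    have hjm : j < m := by rw [hLlen] at hjl; exact hjl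
    rw [List.getElem_reverse]
    simp only [List.getElem_take, List.getElem_drop, hRlen]
    have hp := hpal (m - 1 - j) (by omega) (by omega)
    rw [List.getD_eq_getElem _ _ (by omega), List.getD_eq_getElem _ _ (by omega)] at hp
    have e : i - m + j = i - 1 - (m - 1 - j) := by omega
    simp only [e]
    convert hp using 2

def prevA (data : List Int) (j : Nat) : Int := if j = 0 then -1 else data.getD (j - 1) 0

def cA (data : List Int) (i : Nat) : Bool :=
  decide (data.getD i 0 = prevA data i) && check_symmetry_loop data (i : Int) 0 (data.length + 1)

lemma foldA (data : List Int) (j : Nat) :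
    ((List.range j).map (fun k : Nat => (k : Int))).foldl (stepA data) ((-1 : Int), []) =
      (prevA data j, ((List.range j).filter (cA data)).map (fun k : Nat => (k : Int))) := by
  induction j with
  | zero => simp [prevA]
  | succ j ih =>
    rw [List.range_succ, List.map_append, List.foldl_append, ih]
    simp only [List.map_cons, List.map_nil, List.foldl_cons, List.foldl_nil]
    rw [List.filter_append, List.map_append]
    have hp : prevA data (j + 1) = data.getD j 0 := by simp [prevA]
    by_cases hd : data.getD j 0 = prevA data j
    · by_cases hc : check_symmetry_loop data (j : Int) 0 (data.length + 1) = true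
      · have hcA : cA data j = true := by unfold cA; rw [decide_eq_true hd, hc]; rfl
        simp only [stepA, PySem.List.pyGetD_natCast]
        rw [if_pos hd, if_pos hc, hp]
        simp [hcA]
      · rw [Bool.not_eq_true] at hc
        have hcA : cA data j = false := by unfold cA; rw [hc, Bool.and_false]
        simp only [stepA, PySem.List.pyGetD_natCast]
        rw [if_pos hd, if_neg (by rw [hc]; exact Bool.false_ne_true), hp]
        simp [hcA]
    · have hcA : cA data j = false := by unfold cA; rw [decide_eq_false hd, Bool.false_and]
      simp only [stepA, PySem.List.pyGetD_natCast]
      rw [if_neg hd, hp]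
      simp [hcA]

lemma cA_zero (data : List Int) (hD : ¬ D_find_symmetries data) : cA data 0 = false := by
  cases data with
  | nil => simp [cA, prevA]
  | cons a tl =>
    have ha : a ≠ -1 := fun h => hD (by simp [D_find_symmetries, h])
    simp [cA, prevA, ha]

lemma pointwise (data : List Int) (i : Nat) (h1 : 1 ≤ i) (h2 : i < data.length) :
    cA data i = condB data (i : Int) := by
  rw [Bool.eq_iff_iff]
  simp only [cA, condB, Bool.and_eq_true, decide_eq_true_eq, beq_iff_eq]
  have e1 : ((i : Int) - 1) = ((i - 1 : Nat) : Int) := by omega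
  rw [e1, PySem.List.pyGetD_natCast, PySem.List.pyGetD_natCast]
  have hprev : prevA data i = data.getD (i - 1) 0 := by rw [prevA, if_neg (by omega)]
  rw [hprev, checkA data i, slice_char data i h1 h2]
  constructor <;> rintro ⟨h, hp⟩ <;> exact ⟨h.symm, hp⟩

lemma bridge (p : Nat → Bool) (q : Int → Bool) :
    ∀ (j : Nat), p 0 = false → (∀ i : Nat, 1 ≤ i → i < j → p i = q (i : Int)) →
      ((List.range j).filter p).map (fun k : Nat => (k : Int)) =
        (PySem.List.pyRange 1 (j : Int)).filter q := by
  intro j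
  induction j with
  | zero =>
    intro h0 hpt
    simp only [List.range_zero, List.filter_nil, List.map_nil, Nat.cast_zero]
    rfl
  | succ j ih =>
    intro h0 hpt
    rcases Nat.eq_zero_or_pos j with rfl | hj
    · simp only [Nat.zero_add, List.range_one, List.filter_singleton, h0, cond_false,
        List.map_nil, Nat.cast_one]
      rfl
    · rw [List.range_succ, List.filter_append, List.map_append,
        ih h0 (fun i a b => hpt i a (by omega)),
        show ((j + 1 : Nat) : Int) = (j : Int) + 1 by push_cast; ring,
        PySem.List.pyRange_one_succ_right (by omega : (1 : Int) ≤ (j : Int)),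
        List.filter_append]
      congr 1
      simp only [List.filter_singleton]
      rw [← hpt j hj (by omega)]
      cases hq : p j <;> simp only [cond_false, cond_true, List.map_nil, List.map_cons]

lemma prefix_mem (data : List Int) :
    ∀ (l : List Int) (st : Int × List Int) (x : Int),
      x ∈ st.2 → x ∈ (l.foldl (stepA data) st).2 := by
  intro l
  induction l with
  | nil => intro st x h; simpa using h
  | cons a l ih =>
    intro st x h
    simp only [List.foldl_cons]
    apply ih
    simp only [stepA]
    split_ifs <;> simp [h]

-- ===== VERDICT (by name: the statement is the Claim_ definition above) =====
theorem find_symmetries_spec : Claim_unchanged_find_symmetries := by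
  intro data _ hD
  show find_symmetries data = find_symmetries_alt data
  rw [find_symmetries_eq, find_symmetries_alt_eq, PySem.List.pyRange_zero_natCast, foldA]
  exact bridge (cA data) (condB data) data.length (cA_zero data hD)
    (fun i a b => pointwise data i a b)

theorem find_symmetries_changed : Claim_changed_find_symmetries := by
  unfold Claim_changed_find_symmetries; decide

theorem find_symmetries_tight : Claim_exact_find_symmetries := by
  intro data _ hD heq
  cases data with
  | nil => simp [D_find_symmetries] at hD
  | cons a tl =>
    have ha : a = -1 := by simpa [D_find_symmetries] using hD
    subst ha
    have h0A : (0 : Int) ∈ find_symmetries (-1 :: tl) := by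
      rw [find_symmetries_eq,
        PySem.List.pyRange_one_cons (by simp : (0 : Int) < (((-1 :: tl : List Int)).length : Int)),
        List.foldl_cons]
      apply prefix_mem
      have hchk : check_symmetry_loop (-1 :: tl) 0 0 (tl.length + 1 + 1) = true := by
        simp [check_symmetry_loop]
      simp [stepA, PySem.List.pyGetD_ofNat', hchk]
    have h0B : (0 : Int) ∉ find_symmetries_alt (-1 :: tl) := by
      rw [find_symmetries_alt_eq]
      intro hmem
      have h := PySem.List.mem_pyRange_one.mp (List.mem_filter.mp hmem).1
      omega
    exact h0B (heq ▸ h0A)
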